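-- pv_equiv track=rewrite | github.com/Ruturaj-Vasant/Political-Economy-Of-Corporate-Fraud | scripts/SEC_Documents/text_sct_extractor.py | _reflow_paragraphs
-- ===== SOURCE A (Python) =====
-- from typing import List, Optional, Tuple, Dict, Any
--
-- def _reflow_paragraphs(block: str) -> List[str]:
--     paras: List[str] = []
--     cur: List[str] = []
--     for line in block.splitlines():
--         if line.strip():
--             cur.append(line.strip())
--         else:
--             if cur:
--                 paras.append(" ".join(cur))
--                 cur = []
--     if cur:
--         paras.append(" ".join(cur))
--     return paras
-- ===== SOURCE B (Python) =====
-- from typing import List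
--
-- def _reflow_paragraphs(block: str) -> List[str]:
--     # Strip every line up front, then pop whole non-blank runs off a reversed
--     # stack: no pending-buffer / flush branch as in the accumulator version.
--     rest = [line.strip() for line in block.splitlines()]
--     rest.reverse()
--     paras: List[str] = []
--     while rest:
--         line = rest.pop()
--         if line:
--             run = [line]
--             while rest and rest[-1]:
--                 run.append(rest.pop())
--             paras.append(" ".join(run))
--     return paras
-- ===== Notes on version B (the rewrite author's own statement) =====
-- stated objective: alternative
-- what changed: Replaces the accumulate-and-flush state machine with a run-extraction pass: all lines are stripped up front, then whole non-blank runs are popped off a reversed stack and joined, eliminating the pending-buffer and trailing-flush branches.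
import Mathlib
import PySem

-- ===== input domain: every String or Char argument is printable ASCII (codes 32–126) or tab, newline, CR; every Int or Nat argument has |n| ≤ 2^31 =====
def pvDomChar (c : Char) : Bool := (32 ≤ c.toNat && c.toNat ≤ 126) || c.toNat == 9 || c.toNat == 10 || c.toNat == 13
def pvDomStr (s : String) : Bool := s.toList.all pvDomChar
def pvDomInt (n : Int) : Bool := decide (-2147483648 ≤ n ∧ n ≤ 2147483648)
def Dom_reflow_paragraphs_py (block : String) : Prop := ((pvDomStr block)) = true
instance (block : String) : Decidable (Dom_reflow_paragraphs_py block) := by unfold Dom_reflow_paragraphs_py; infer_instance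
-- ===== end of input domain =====

-- B replaces A's accumulate-and-flush loop by stripping all lines first and then
-- extracting whole non-blank runs; same O(n) cost, different decomposition.

-- ===== PORT A =====
-- one loop step: `if line.strip(): cur.append(...) else: if cur: flush`
def pvStepA (st : List String × List String) (line : String) : List String × List String :=
  if PySem.Str.strip line != "" then (st.1, st.2 ++ [PySem.Str.strip line])
  else if st.2 != [] then (st.1 ++ [PySem.Str.join " " st.2], ([] : List String))
  else st

def reflow_paragraphs_py (block : String) : List String :=
  let st := (PySem.Str.splitlines block).foldl pvStepA ([], [])
  if st.2 != [] then st.1 ++ [PySem.Str.join " " st.2] else st.1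

-- ===== PORT B =====
-- inner `while rest and rest[-1]: run.append(rest.pop())` (rest is reversed, so
-- popping from its end is taking the head of the in-order remainder)
def pvGrabRun : List String → List String × List String
  | [] => ([], [])
  | l :: ls =>
    if l == "" then ([], l :: ls)
    else
      let r := pvGrabRun ls
      (l :: r.1, r.2)

lemma pvGrabRun_eq (ls : List String) :
    pvGrabRun ls = (ls.takeWhile (fun s => s != ""), ls.dropWhile (fun s => s != "")) := by
  induction ls with
  | nil => rfl
  | cons l ls ih =>
    by_cases h : l = "" <;> simp [pvGrabRun, h, ih]

-- outer `while rest:` loop of B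
def pvRuns : List String → List String
  | [] => []
  | l :: ls =>
    if l == "" then pvRuns ls
    else
      let g := pvGrabRun ls
      PySem.Str.join " " (l :: g.1) :: pvRuns g.2
  termination_by ls => ls.length
  decreasing_by
    · simp
    · simp only [pvGrabRun_eq]
      have := List.length_dropWhile_le (p := fun s : String => s != "") (l := ls)
      simp at this ⊢; omega

def reflow_paragraphs_py_alt (block : String) : List String :=
  pvRuns ((PySem.Str.splitlines block).map PySem.Str.strip)

-- ===== PRECONDITION & SPEC =====
def Spec_reflow_paragraphs_py (block : String) (out : List String) : Prop := out = reflow_paragraphs_py_alt block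
instance (block : String) (out : List String) : Decidable (Spec_reflow_paragraphs_py block out) := by unfold Spec_reflow_paragraphs_py; infer_instance

-- ===== CLAIM (what is proved, stated in full; the proofs are below) =====
def Claim_equal_reflow_paragraphs_py : Prop := ∀ (block : String), Dom_reflow_paragraphs_py block → Spec_reflow_paragraphs_py block (reflow_paragraphs_py block)

-- ===== LEMMAS AND PROOFS =====
lemma pvMain (ls : List String) : ∀ paras cur : List String,
    (let st := ls.foldl pvStepA (paras, cur)
     if st.2 != [] then st.1 ++ [PySem.Str.join " " st.2] else st.1) =
    paras ++ (if cur == [] then pvRuns (ls.map PySem.Str.strip)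
      else PySem.Str.join " " (cur ++ (ls.map PySem.Str.strip).takeWhile (fun s => s != "")) ::
           pvRuns ((ls.map PySem.Str.strip).dropWhile (fun s => s != ""))) := by
  induction ls with
  | nil =>
    intro paras cur
    by_cases h : cur = [] <;> simp [pvRuns, h]
  | cons l ls ih =>
    intro paras cur
    by_cases h : PySem.Str.strip l = ""
    · by_cases hc : cur = []
      · have hstep : pvStepA (paras, cur) l = (paras, cur) := by simp [pvStepA, h, hc]
        simp only [List.foldl_cons, hstep]
        simpa [pvRuns, h, hc] using ih paras cur
      · have hstep : pvStepA (paras, cur) l = (paras ++ [PySem.Str.join " " cur], []) := by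
          simp [pvStepA, h, hc]
        simp only [List.foldl_cons, hstep]
        have h2 := ih (paras ++ [PySem.Str.join " " cur]) []
        simp only [BEq.rfl, if_true] at h2
        rw [h2]
        simp [pvRuns, h, hc]
    · have hstep : pvStepA (paras, cur) l = (paras, cur ++ [PySem.Str.strip l]) := by
        simp [pvStepA, h]
      simp only [List.foldl_cons, hstep]
      have h2 := ih paras (cur ++ [PySem.Str.strip l])
      have hne : (cur ++ [PySem.Str.strip l] == []) = false := by simp
      simp only [hne, Bool.false_eq_true, if_false] at h2
      rw [h2]
      by_cases hc : cur = []
      · subst hc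
        simp [pvRuns, h, pvGrabRun_eq]
      · simp [hc, h]

-- ===== VERDICT (by name: the statement is the Claim_ definition above) =====
theorem reflow_paragraphs_py_spec : Claim_equal_reflow_paragraphs_py := by
  intro block _
  unfold Spec_reflow_paragraphs_py reflow_paragraphs_py reflow_paragraphs_py_alt
  simpa using pvMain (PySem.Str.splitlines block) [] []
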